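-- pv_equiv track=rewrite | github.com/torrresagus/UADE-Introduccion-a-la-Algoritmia | Guia de Trabajos Practicos 2022/Trabajo Practico 6 - Funciones/Ejercicio11.py | digitocentral
-- ===== SOURCE A (Python) =====
-- def paridad(numero):
--     if numero % 2 == 0:
--         return True
--     else:
--         return False
--
-- def digitocentral(numero):
--     num_original = numero
--     if numero < 0:
--         numero = numero * -1
--     contador = 0
--     while numero > 0:
--         contador += 1
--         numero = numero // 10
--     if paridad(contador):
--         return -1
--     else:
--         if num_original < 0:
--             num_original = num_original * -1
--         for i in range(contador//2 + 1):
--             digito = num_original % 10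
--             num_original = num_original // 10
--         return digito
-- ===== SOURCE B (Python) =====
-- def digitocentral(numero):
--     n = abs(numero)
--     digits = []
--     while n > 0:
--         digits.append(n % 10)
--         n //= 10
--     if len(digits) % 2 == 0:
--         return -1
--     return digits[len(digits) // 2]
-- ===== Notes on version B (the rewrite author's own statement) =====
-- stated objective: simpler
-- what changed: B collects the digits (least-significant first) in a single pass and returns -1 for an even count or the list's middle element directly, replacing A's count loop plus a second re-extraction loop.
import Mathlib
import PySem

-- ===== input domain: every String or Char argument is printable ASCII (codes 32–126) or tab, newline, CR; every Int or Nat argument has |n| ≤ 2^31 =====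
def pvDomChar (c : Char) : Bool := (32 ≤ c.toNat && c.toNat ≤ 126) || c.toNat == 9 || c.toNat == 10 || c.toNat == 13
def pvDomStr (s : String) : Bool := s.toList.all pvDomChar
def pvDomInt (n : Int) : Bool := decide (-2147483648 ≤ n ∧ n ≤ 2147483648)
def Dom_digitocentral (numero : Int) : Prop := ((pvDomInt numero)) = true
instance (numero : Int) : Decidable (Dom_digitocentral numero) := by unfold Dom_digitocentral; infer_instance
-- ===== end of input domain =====

-- B collects the digits in one pass and indexes the middle, instead of A's count-then-re-extract two loops; same return value everywhere.
-- ===== PORT A =====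
def paridad (numero : Int) : Bool :=
  if PySem.Int.mod numero 2 == 0 then true else false

-- A's counting while-loop: `while numero > 0: contador += 1; numero //= 10`
def aCountLoop (numero : Int) (contador : Int) : Int :=
  if h : numero > 0 then
    aCountLoop (PySem.Int.floordiv numero 10) (contador + 1)
  else contador
termination_by numero.toNat
decreasing_by
  have : PySem.Int.floordiv numero 10 = numero / 10 :=
    PySem.Int.floordiv_eq_ediv_of_pos (by omega)
  omega

def digitocentral (numero : Int) : Int :=
  let num_original := numero
  let numero1 := if numero < 0 then numero * -1 else numero
  let contador := aCountLoop numero1 0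
  if paridad contador then -1
  else
    let num_original1 := if num_original < 0 then num_original * -1 else num_original
    -- for i in range(contador//2 + 1): digito = n % 10; n = n // 10   (digito starts unassigned; the loop always runs)
    let st := (PySem.List.pyRange 0 (PySem.Int.floordiv contador 2 + 1) 1).foldl
      (fun (s : Int × Int) _ => (PySem.Int.floordiv s.1 10, PySem.Int.mod s.1 10)) (num_original1, 0)
    st.2

-- ===== PORT B =====
-- B's collecting while-loop: digits of n, least-significant first
def bDigits (n : Int) : List Int :=
  if _h : n > 0 then
    PySem.Int.mod n 10 :: bDigits (PySem.Int.floordiv n 10)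
  else []
termination_by n.toNat
decreasing_by
  have : PySem.Int.floordiv n 10 = n / 10 :=
    PySem.Int.floordiv_eq_ediv_of_pos (by omega)
  omega

def digitocentral_alt (numero : Int) : Int :=
  let digits := bDigits (if numero < 0 then -numero else numero)
  if (digits.length % 2) == 0 then -1
  else digits.getD (digits.length / 2) 0

-- ===== PRECONDITION & SPEC =====
def Spec_digitocentral (numero : Int) (out : Int) : Prop := out = digitocentral_alt numero
instance (numero : Int) (out : Int) : Decidable (Spec_digitocentral numero out) := by unfold Spec_digitocentral; infer_instance

-- ===== CLAIM (what is proved, stated in full; the proofs are below) =====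
def Claim_equal_digitocentral : Prop := ∀ (numero : Int), Dom_digitocentral numero → Spec_digitocentral numero (digitocentral numero)

-- ===== LEMMAS AND PROOFS =====

theorem floordiv_ten_nonneg (a : Int) (h : 0 ≤ a) : 0 ≤ PySem.Int.floordiv a 10 := by
  have := PySem.Int.floordiv_eq_ediv_of_pos (a := a) (b := 10) (by omega)
  omega

-- A's counting loop counts exactly the digits B collects.
theorem aCountLoop_eq_len (n : Int) : ∀ c : Int, aCountLoop n c = c + ((bDigits n).length : Int) := by
  induction n using bDigits.induct with
  | case1 n h ih =>
    intro c
    rw [aCountLoop, bDigits]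
    simp only [h, dif_pos, List.length_cons, ih (c + 1)]
    push_cast; ring
  | case2 n h =>
    intro c
    rw [aCountLoop, bDigits]
    simp [h]

-- A's extraction loop lands on the digit B indexes: after l.length iterations the last
-- extracted digit is the (l.length - 1)-th least-significant digit (0 past the end, as A's loop keeps dividing 0).
theorem bDigits_zero : bDigits 0 = [] := by rw [bDigits]; simp

theorem fold_digito (l : List Int) (hne : l ≠ []) :
    ∀ (n d : Int), 0 ≤ n →
      ((l.foldl (fun (s : Int × Int) _ => (PySem.Int.floordiv s.1 10, PySem.Int.mod s.1 10)) (n, d)).2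
        = (bDigits n).getD (l.length - 1) 0) := by
  induction l with
  | nil => exact absurd rfl hne
  | cons a t ih =>
    intro n d hn
    rcases t with _ | ⟨b, t'⟩
    · -- one iteration left: the digit extracted is n % 10, which is B's digit 0 (or 0 when n = 0)
      simp only [List.foldl_cons, List.foldl_nil]
      rw [bDigits]
      by_cases hpos : n > 0
      · simp [hpos]
      · have hz : n = 0 := by omega
        subst hz
        simp
    · rw [List.foldl_cons]
      rw [ih (by simp) _ _ (floordiv_ten_nonneg n hn)]
      conv_rhs => rw [bDigits]
      by_cases hpos : n > 0
      · simp [hpos]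
      · have hz : n = 0 := by omega
        subst hz
        simp [bDigits_zero]

-- ===== VERDICT (by name: the statement is the Claim_ definition above) =====
theorem digitocentral_spec : Claim_equal_digitocentral := by
  intro numero _
  unfold Spec_digitocentral digitocentral digitocentral_alt
  have hneg : (if numero < 0 then numero * -1 else numero)
      = (if numero < 0 then -numero else numero) := by split <;> ring
  simp only [hneg]
  generalize hgen : (if numero < 0 then -numero else numero) = m
  have hm0 : 0 ≤ m := by rw [← hgen]; split <;> omega
  have hcount : aCountLoop m 0 = (((bDigits m).length : Nat) : Int) := by
    rw [aCountLoop_eq_len]; ring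
  rw [hcount]
  have hpar : paridad (((bDigits m).length : Nat) : Int) = ((bDigits m).length % 2 == 0) := by
    unfold paridad
    rw [show ((2 : Int)) = ((2 : Nat) : Int) from rfl, PySem.Int.mod_natCast]
    rcases Nat.mod_two_eq_zero_or_one (bDigits m).length with h | h <;> simp [h]
  rw [hpar]
  by_cases heven : (bDigits m).length % 2 = 0
  · simp [heven]
  · have hidx : PySem.Int.floordiv (((bDigits m).length : Nat) : Int) 2
        = (((bDigits m).length / 2 : Nat) : Int) := by
      rw [show ((2 : Int)) = ((2 : Nat) : Int) from rfl, PySem.Int.floordiv_natCast]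
    rw [hidx,
        show (((bDigits m).length / 2 : Nat) : Int) + 1
            = (((bDigits m).length / 2 + 1 : Nat) : Int) from by push_cast; ring,
        PySem.List.pyRange_zero_natCast]
    rw [fold_digito _ (by simp) m 0 hm0]
    simp [heven]
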